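-- pv_equiv track=rewrite | github.com/labcodes/dojo | 15072020/main.py | caminhar_corredor
-- ===== SOURCE A (Python) =====
-- def apertar_interruptor(lampada):
--     if lampada == 'on':
--         return 'off'
--     if lampada == 'off':
--         return 'on'
--
-- def caminhar_corredor(num_lampadas):
--     corredor_de_lampadas = ['off' for _ in range(num_lampadas)]
--
--     for caminhada in range(1, num_lampadas+1):
--         corredor_de_lampadas = [
--             lampada if (indice + 1) % caminhada else apertar_interruptor(lampada)
--             for indice, lampada in enumerate(corredor_de_lampadas)
--         ]
--
--     return corredor_de_lampadas
-- ===== SOURCE B (Python) =====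
-- def caminhar_corredor(num_lampadas):
--     # Lamp i ends 'on' iff i+1 has an odd number of divisors, i.e. i+1 is a perfect square.
--     corredor = ['off'] * num_lampadas
--     k = 1
--     while k * k <= num_lampadas:
--         corredor[k * k - 1] = 'on'
--         k += 1
--     return corredor
-- ===== Notes on version B (the rewrite author's own statement) =====
-- stated objective: faster
-- what changed: Replaces the n nested toggle passes over the corridor (lamp i toggled once per divisor of i+1) with the number-theoretic closed form: allocate all-'off' once and switch on exactly the perfect-square positions k*k-1 in a single while loop.
import Mathlib
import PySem

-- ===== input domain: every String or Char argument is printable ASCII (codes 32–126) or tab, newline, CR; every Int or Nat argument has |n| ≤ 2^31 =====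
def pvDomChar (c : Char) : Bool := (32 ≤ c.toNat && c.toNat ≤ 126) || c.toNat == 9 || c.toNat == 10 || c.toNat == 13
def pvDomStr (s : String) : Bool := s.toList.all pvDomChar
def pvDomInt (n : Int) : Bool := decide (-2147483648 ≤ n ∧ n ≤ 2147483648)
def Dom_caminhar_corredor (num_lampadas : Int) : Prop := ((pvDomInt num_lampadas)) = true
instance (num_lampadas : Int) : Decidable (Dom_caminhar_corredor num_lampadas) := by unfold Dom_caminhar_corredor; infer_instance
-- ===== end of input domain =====

-- B replaces A's n full toggle passes over the corridor (lamp i toggled once per divisor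
-- of i+1) by switching on exactly the perfect-square positions of an all-'off' list.

-- ===== PORT A =====
def apertar_interruptor (lampada : String) : String :=
  if lampada = "on" then "off"
  else if lampada = "off" then "on"
  else ""  -- Python returns None here; unreachable (lamps are always 'on'/'off')

def caminhar_corredor (num_lampadas : Int) : List String :=
  let corredor_de_lampadas := (PySem.List.pyRange 0 num_lampadas).map (fun _ => "off")
  (PySem.List.pyRange 1 (num_lampadas + 1)).foldl
    (fun corredor caminhada =>
      (PySem.List.enumerate corredor).map (fun p =>
        if PySem.Int.mod (p.1 + 1) caminhada ≠ 0 then p.2 else apertar_interruptor p.2))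
    corredor_de_lampadas

-- ===== PORT B =====
-- the while loop of Source B: switch on position k*k-1 while k*k ≤ num_lampadas
def altLoop (num_lampadas : Int) (corredor : List String) (k : Int) : List String :=
  if k * k ≤ num_lampadas then
    altLoop num_lampadas (corredor.set (k * k - 1).toNat "on") (k + 1)
  else corredor
termination_by (num_lampadas + 1 - k).toNat
decreasing_by
  have hk2 : k ≤ k * k := by
    rcases (by omega : k ≤ 0 ∨ 1 ≤ k) with h | h
    · exact h.trans (mul_self_nonneg k)
    · nlinarith
  omega

def caminhar_corredor_alt (num_lampadas : Int) : List String :=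
  altLoop num_lampadas (List.replicate num_lampadas.toNat "off") 1

-- ===== PRECONDITION & SPEC =====
def Spec_caminhar_corredor (num_lampadas : Int) (out : List String) : Prop := out = caminhar_corredor_alt num_lampadas
instance (num_lampadas : Int) (out : List String) : Decidable (Spec_caminhar_corredor num_lampadas out) := by unfold Spec_caminhar_corredor; infer_instance

-- ===== CLAIM (what is proved, stated in full; the proofs are below) =====
def Claim_equal_caminhar_corredor : Prop := ∀ (num_lampadas : Int), Dom_caminhar_corredor num_lampadas → Spec_caminhar_corredor num_lampadas (caminhar_corredor num_lampadas)

-- ===== LEMMAS AND PROOFS =====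

-- abbreviation for A's per-walk pass
def pyStep (corredor : List String) (caminhada : Int) : List String :=
  (PySem.List.enumerate corredor).map (fun p =>
    if PySem.Int.mod (p.1 + 1) caminhada ≠ 0 then p.2 else apertar_interruptor p.2)

lemma caminhar_eq_fold (n : Int) :
    caminhar_corredor n =
      (PySem.List.pyRange 1 (n + 1)).foldl pyStep ((PySem.List.pyRange 0 n).map (fun _ => "off")) := rfl

lemma enumerate_map_length {α β : Type} (f : Int × α → β) :
    ∀ (l : List α) (s : Int), ((PySem.List.enumerate l s).map f).length = l.length := by
  intro l
  induction l with
  | nil => intro s; rfl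
  | cons x t ih => intro s; simp [PySem.List.enumerate, ih]

lemma enumerate_map_get? {α β : Type} (f : Int × α → β) :
    ∀ (l : List α) (s : Int) (i : Nat) (hi : i < l.length),
      ((PySem.List.enumerate l s).map f)[i]? = some (f (s + i, l[i])) := by
  intro l
  induction l with
  | nil => intro s i hi; simp at hi
  | cons x t ih =>
    intro s i hi
    cases i with
    | zero => simp [PySem.List.enumerate]
    | succ j =>
      have hj : j < t.length := by simpa using hi
      have hcons : PySem.List.enumerate (x :: t) s = (s, x) :: PySem.List.enumerate t (s + 1) := by
        simp [PySem.List.enumerate]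
      rw [hcons, List.map_cons, List.getElem?_cons_succ, ih (s + 1) j hj]
      have harg : s + 1 + (j : Int) = s + ((j + 1 : Nat) : Int) := by push_cast; ring
      rw [List.getElem_cons_succ, harg]

lemma pyStep_length (xs : List String) (c : Int) : (pyStep xs c).length = xs.length :=
  enumerate_map_length _ xs 0

lemma pyStep_get? (xs : List String) (c : Int) (i : Nat) (hi : i < xs.length) :
    (pyStep xs c)[i]? =
      some (if PySem.Int.mod ((i : Int) + 1) c ≠ 0 then xs[i] else apertar_interruptor xs[i]) := by
  have h := enumerate_map_get? (fun p : Int × String =>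
    if PySem.Int.mod (p.1 + 1) c ≠ 0 then p.2 else apertar_interruptor p.2) xs 0 i hi
  simpa [pyStep] using h

lemma pyStep_getElem (xs : List String) (c : Int) (i : Nat) (hi : i < xs.length) :
    (pyStep xs c)[i]'(by rw [pyStep_length]; exact hi) =
      if PySem.Int.mod ((i : Int) + 1) c ≠ 0 then xs[i] else apertar_interruptor xs[i] := by
  have h := pyStep_get? xs c i hi
  rw [List.getElem?_eq_getElem (by rw [pyStep_length]; exact hi)] at h
  exact Option.some.inj h

lemma fold_length : ∀ (cs : List Int) (xs : List String), (cs.foldl pyStep xs).length = xs.length := by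
  intro cs
  induction cs with
  | nil => intro xs; rfl
  | cons c cs ih => intro xs; simpa [List.foldl_cons, pyStep_length] using ih (pyStep xs c)

lemma fold_get? : ∀ (cs : List Int) (xs : List String) (i : Nat) (hi : i < xs.length),
    (cs.foldl pyStep xs)[i]? =
      some (apertar_interruptor^[cs.countP (fun c => PySem.Int.mod ((i : Int) + 1) c == 0)] xs[i]) := by
  intro cs
  induction cs with
  | nil =>
    intro xs i hi
    simp [List.getElem?_eq_getElem hi]
  | cons c cs ih =>
    intro xs i hi
    rw [List.foldl_cons, ih (pyStep xs c) i (by rw [pyStep_length]; exact hi)]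
    rw [pyStep_getElem xs c i hi, List.countP_cons]
    by_cases h : PySem.Int.mod ((i : Int) + 1) c = 0
    · simp [h, Function.iterate_succ_apply]
    · simp [h]

lemma apertar_iter (n : Nat) :
    apertar_interruptor^[n] "off" = if n % 2 = 1 then "on" else "off" := by
  induction n with
  | zero => rfl
  | succ n ih =>
    rw [Function.iterate_succ_apply', ih]
    rcases Nat.mod_two_eq_zero_or_one n with h | h <;>
      simp [apertar_interruptor, h, Nat.succ_mod_two_eq_one_iff]

lemma pyRange_one_eq (N : Nat) :
    PySem.List.pyRange 1 ((N : Int) + 1) = (List.range N).map (fun k : Nat => ((k : Int) + 1)) := by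
  induction N with
  | zero => rfl
  | succ N ih =>
    have h1 : (1 : Int) ≤ (N : Int) + 1 := by omega
    have h2 : ((N + 1 : Nat) : Int) + 1 = ((N : Int) + 1) + 1 := by push_cast; ring
    rw [h2, PySem.List.pyRange_one_succ_right h1, ih, List.range_succ]
    simp

lemma countP_divisors (n : Int) (m : Nat) (hm : 1 ≤ m) (hmn : (m : Int) ≤ n) :
    (PySem.List.pyRange 1 (n + 1)).countP (fun c => PySem.Int.mod ((m : Int)) c == 0) =
      m.divisors.card := by
  have hn : n = (n.toNat : Int) := by omega
  rw [hn, pyRange_one_eq, List.countP_map]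
  set N := n.toNat with hN
  have hmN : m ≤ N := by omega
  have heq : ((fun c => PySem.Int.mod (↑m) c == 0) ∘ fun k : Nat => ((k : Int) + 1))
       = fun k : Nat => decide ((k + 1) ∣ m) := by
    funext k
    have hc : ((k : Int) + 1) = ((k + 1 : Nat) : Int) := by push_cast; ring
    rw [Bool.eq_iff_iff]
    simp only [Function.comp_apply, beq_iff_eq, decide_eq_true_eq, hc,
      PySem.Int.mod_eq_zero_iff_dvd]
    exact Int.natCast_dvd_natCast
  rw [heq]
  have hcount : (List.range N).countP (fun k => decide ((k + 1) ∣ m)) =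
      ((Finset.range N).filter (fun k => (k + 1) ∣ m)).card := by
    rw [List.countP_eq_length_filter]
    rfl
  rw [hcount]
  refine Finset.card_bij' (fun k _ => k + 1) (fun d _ => d - 1) ?_ ?_ ?_ ?_
  · intro k hk
    simp only [Finset.mem_filter, Finset.mem_range] at hk
    exact Nat.mem_divisors.mpr ⟨hk.2, by omega⟩
  · intro d hd
    have h1 := Nat.pos_of_mem_divisors hd
    have h2 := Nat.le_of_dvd (by omega) (Nat.mem_divisors.mp hd).1
    have hdvd := (Nat.mem_divisors.mp hd).1
    simp only [Finset.mem_filter, Finset.mem_range]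
    refine ⟨by omega, ?_⟩
    have h3 : d - 1 + 1 = d := by omega
    rw [h3]; exact hdvd
  · intro k hk; simp
  · intro d hd
    have h1 := Nat.pos_of_mem_divisors hd
    simp only []
    omega

lemma even_card_of_no_fixed (m : Nat) (S : Finset Nat) (hS : S ⊆ m.divisors)
    (hmem : ∀ d ∈ S, m / d ∈ S) (hnf : ∀ d ∈ S, m / d ≠ d) : S.card % 2 = 0 := by
  have h0 : ∑ _x ∈ S, (1 : ZMod 2) = 0 := by
    apply Finset.sum_involution (fun d _ => m / d)
    · intro a ha; decide
    · intro a ha _; exact hnf a ha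
    · intro a ha; exact hmem a ha
    · intro a ha
      have hd := Nat.mem_divisors.mp (hS ha)
      exact Nat.div_div_self hd.1 hd.2
  rw [Finset.sum_const, nsmul_eq_mul, mul_one] at h0
  have := (ZMod.natCast_eq_zero_iff S.card 2).mp h0
  omega

lemma odd_divisors_iff (m : Nat) (hm : 0 < m) :
    m.divisors.card % 2 = 1 ↔ Nat.sqrt m * Nat.sqrt m = m := by
  set s := Nat.sqrt m with hs
  constructor
  · intro hodd
    by_contra hns
    have h := even_card_of_no_fixed m m.divisors (subset_refl _)
      (fun d hd => by
        have hd' := Nat.mem_divisors.mp hd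
        exact Nat.mem_divisors.mpr ⟨Nat.div_dvd_of_dvd hd'.1, hd'.2⟩)
      (fun d hd hfix => by
        have hd' := Nat.mem_divisors.mp hd
        have hdm : d * d = m := by
          have := Nat.div_mul_cancel hd'.1
          rw [hfix] at this; exact this
        apply hns
        have hsd : Nat.sqrt m = d := by rw [← hdm, ← pow_two, Nat.sqrt_eq']
        rw [hs, hsd, hdm])
    omega
  · intro hsq
    have hsmem : s ∈ m.divisors := Nat.mem_divisors.mpr ⟨⟨s, hsq.symm⟩, by omega⟩
    have hspos : 0 < s := by
      rcases Nat.eq_zero_or_pos s with h | h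
      · rw [h] at hsq; omega
      · exact h
    have h := even_card_of_no_fixed m (m.divisors.erase s) (Finset.erase_subset _ _)
      (fun d hd => by
        obtain ⟨hne, hdv⟩ := Finset.mem_erase.mp hd
        have hd' := Nat.mem_divisors.mp hdv
        refine Finset.mem_erase.mpr ⟨?_, Nat.mem_divisors.mpr ⟨Nat.div_dvd_of_dvd hd'.1, hd'.2⟩⟩
        intro hmd
        apply hne
        have hdd : m / (m / d) = d := Nat.div_div_self hd'.1 hd'.2
        rw [hmd] at hdd
        have hms : m / s = s := by
          conv_lhs => rw [← hsq]
          exact Nat.mul_div_cancel_left s hspos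
        rw [hms] at hdd
        omega)
      (fun d hd hfix => by
        obtain ⟨hne, hdv⟩ := Finset.mem_erase.mp hd
        have hd' := Nat.mem_divisors.mp hdv
        apply hne
        have hdm : d * d = m := by
          have := Nat.div_mul_cancel hd'.1
          rw [hfix] at this; exact this
        have hsd : Nat.sqrt m = d := by rw [← hdm, ← pow_two, Nat.sqrt_eq']
        rw [hs, hsd])
    have hcard : m.divisors.card = (m.divisors.erase s).card + 1 := by
      rw [Finset.card_erase_of_mem hsmem]
      have : 0 < m.divisors.card := Finset.card_pos.mpr ⟨s, hsmem⟩
      omega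
    omega

-- the on/off condition maintained by Source B's loop
def altCond (n : Int) (k : Int) (i : Nat) : Bool :=
  decide (Nat.sqrt (i + 1) * Nat.sqrt (i + 1) = i + 1) &&
    decide (k ≤ (Nat.sqrt (i + 1) : Int)) && decide ((i : Int) + 1 ≤ n)

lemma altCond_iff (n k : Int) (i : Nat) : altCond n k i = true ↔
    (Nat.sqrt (i + 1) * Nat.sqrt (i + 1) = i + 1 ∧ k ≤ (Nat.sqrt (i + 1) : Int) ∧ (i : Int) + 1 ≤ n) := by
  simp [altCond, and_assoc]

lemma altLoop_length (n : Int) : ∀ (cor : List String) (k : Int), (altLoop n cor k).length = cor.length := by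
  intro cor k
  induction cor, k using altLoop.induct n with
  | case1 cor k hcond ih => rw [altLoop, if_pos hcond]; rw [ih]; simp
  | case2 cor k hcond => rw [altLoop, if_neg hcond]

lemma altLoop_get? (n : Int) : ∀ (cor : List String) (k : Int), 1 ≤ k →
    ∀ (i : Nat) (hi : i < cor.length),
      (altLoop n cor k)[i]? =
        some (if altCond n k i then "on" else cor[i]) := by
  intro cor k
  induction cor, k using altLoop.induct n with
  | case1 cor k hcond ih =>
    intro hk i hi
    rw [altLoop, if_pos hcond]
    have hi' : i < (cor.set (k * k - 1).toNat "on").length := by simpa using hi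
    rw [ih (by omega) i hi']
    have hkk1 : (1:Int) ≤ k * k := by nlinarith
    have hk' : ((k.toNat : Int)) = k := by omega
    have hcast : ((k.toNat * k.toNat : Nat) : Int) = k * k := by push_cast [hk']; ring
    by_cases hpos : i = (k * k - 1).toNat
    · -- the position switched on this step
      have hii : ((i : Int)) + 1 = k * k := by omega
      have hsqrt : Nat.sqrt (i + 1) = k.toNat := by
        have h : i + 1 = k.toNat * k.toNat := by omega
        rw [h, ← pow_two, Nat.sqrt_eq']
      have hcondk : altCond n k i = true :=
        (altCond_iff n k i).mpr ⟨by rw [hsqrt]; omega, by rw [hsqrt]; omega, by omega⟩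
      have hncond : ¬ altCond n (k + 1) i = true := by
        intro hh
        obtain ⟨h1, h2, h3⟩ := (altCond_iff n (k + 1) i).mp hh
        rw [hsqrt] at h2
        omega
      rw [if_neg hncond, if_pos hcondk]
      congr 1
      rw [List.getElem_set]
      simp [hpos]
    · -- untouched position: conditions for k and k+1 coincide
      have hset : (cor.set (k * k - 1).toNat "on")[i] = cor[i] := by
        rw [List.getElem_set, if_neg (fun h => hpos h.symm)]
      rw [hset]
      have hiff : altCond n (k + 1) i = altCond n k i := by
        rw [Bool.eq_iff_iff, altCond_iff, altCond_iff]
        constructor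
        · rintro ⟨h1, h2, h3⟩; exact ⟨h1, by omega, h3⟩
        · rintro ⟨h1, h2, h3⟩
          refine ⟨h1, ?_, h3⟩
          rcases (by omega : k + 1 ≤ (Nat.sqrt (i+1) : Int) ∨ k = (Nat.sqrt (i+1) : Int)) with h | h
          · exact h
          · exfalso
            apply hpos
            have hs' : ((Nat.sqrt (i+1) : Nat) : Int) = k := h.symm
            have : ((Nat.sqrt (i+1) * Nat.sqrt (i+1) : Nat) : Int) = k * k := by
              push_cast [hs']; ring
            omega
      rw [hiff]
  | case2 cor k hcond =>
    intro hk i hi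
    rw [altLoop, if_neg hcond, List.getElem?_eq_getElem hi]
    have : ¬ altCond n k i = true := by
      intro hh
      obtain ⟨h1, h2, h3⟩ := (altCond_iff n k i).mp hh
      have hk0 : (0:Int) ≤ k := by omega
      have : k * k ≤ (Nat.sqrt (i+1) : Int) * (Nat.sqrt (i+1) : Int) := by
        apply mul_le_mul h2 h2 hk0 (by positivity)
      have hc : ((Nat.sqrt (i+1) : Nat) : Int) * (Nat.sqrt (i+1) : Int) = ((i : Int) + 1) := by
        exact_mod_cast congrArg (fun x : Nat => (x : Int)) h1
      omega
    rw [if_neg this]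

lemma pyRange_zero_length (n : Int) : (PySem.List.pyRange 0 n).length = n.toNat := by
  rcases (by omega : n ≤ 0 ∨ 0 ≤ n) with h | h
  · have h1 : PySem.List.pyRange 0 n = [] := by simp [PySem.List.pyRange]; omega
    rw [h1]; simp; omega
  · have h2 : n = (n.toNat : Int) := by omega
    rw [h2, PySem.List.pyRange_zero_natCast]
    simp
    omega

lemma A_length (n : Int) : (caminhar_corredor n).length = n.toNat := by
  rw [caminhar_eq_fold, fold_length, List.length_map, pyRange_zero_length]

lemma B_length (n : Int) : (caminhar_corredor_alt n).length = n.toNat := by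
  rw [caminhar_corredor_alt, altLoop_length, List.length_replicate]

-- ===== VERDICT (by name: the statement is the Claim_ definition above) =====
theorem caminhar_corredor_spec : Claim_equal_caminhar_corredor := by
  intro n _
  unfold Spec_caminhar_corredor
  apply List.ext_getElem?
  intro i
  rcases (by omega : n.toNat ≤ i ∨ i < n.toNat) with h | h
  · rw [List.getElem?_eq_none (by rw [A_length]; exact h),
        List.getElem?_eq_none (by rw [B_length]; exact h)]
  · -- the interesting range
    have hiA : i < ((PySem.List.pyRange 0 n).map (fun _ => "off")).length := by
      rw [List.length_map, pyRange_zero_length]; exact h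
    have hoff : ((PySem.List.pyRange 0 n).map (fun _ => "off"))[i]'hiA = "off" := by
      rw [List.getElem_map]
    rw [caminhar_eq_fold, fold_get? _ _ i hiA, hoff]
    have hiB : i < (List.replicate n.toNat "off").length := by
      rw [List.length_replicate]; exact h
    rw [caminhar_corredor_alt, altLoop_get? n _ 1 (by omega) i hiB]
    have hrep : (List.replicate n.toNat "off")[i]'hiB = "off" := List.getElem_replicate _
    rw [hrep]
    have hcast : ((i : Int)) + 1 = (((i + 1 : Nat)) : Int) := by push_cast; ring
    have hcnt : (PySem.List.pyRange 1 (n + 1)).countP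
        (fun c => PySem.Int.mod ((i : Int) + 1) c == 0) = (i + 1).divisors.card := by
      rw [hcast]
      exact countP_divisors n (i + 1) (by omega) (by omega)
    rw [hcnt, apertar_iter]
    have hcond : altCond n 1 i = true ↔ Nat.sqrt (i + 1) * Nat.sqrt (i + 1) = i + 1 := by
      rw [altCond_iff]
      constructor
      · rintro ⟨h1, _, _⟩; exact h1
      · intro h1
        refine ⟨h1, ?_, by omega⟩
        have : Nat.sqrt (i + 1) ≠ 0 := by
          intro h0; rw [h0] at h1; omega
        omega
    simp only [odd_divisors_iff (i + 1) (by omega), hcond]
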